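-- pv_equiv track=rewrite | github.com/cannon-liu/InfoSearchDisplay | InformationSpider/InformationSpider/utils/common.py | tranfer_str
-- ===== SOURCE A (Python) =====
-- def tranfer_str(url):
--     origin = ['%3A', '%2F', '%3F', '%3D', '%26']
--     tranfer = [':', '/', '?', '=', '&']
--     data_url = url
--     for i, symbol in enumerate(origin):
--         test = symbol
--         temp_url = data_url.replace(symbol, tranfer[i])
--         data_url = temp_url
--
--     return data_url
-- ===== SOURCE B (Python) =====
-- def tranfer_str(url):
--     table = {'%3A': ':', '%2F': '/', '%3F': '?', '%3D': '=', '%26': '&'}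
--     out = []
--     i = 0
--     n = len(url)
--     while i < n:
--         c = url[i]
--         if c == '%':
--             rep = table.get(url[i:i + 3])
--             if rep is not None:
--                 out.append(rep)
--                 i += 3
--                 continue
--         out.append(c)
--         i += 1
--     return ''.join(out)
-- ===== Notes on version B (the rewrite author's own statement) =====
-- stated objective: alternative
-- what changed: Replaces five sequential full-string replace passes with a single left-to-right scan that looks up each three-character '%'-escape in a dict and copies everything else verbatim.
import Mathlib
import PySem

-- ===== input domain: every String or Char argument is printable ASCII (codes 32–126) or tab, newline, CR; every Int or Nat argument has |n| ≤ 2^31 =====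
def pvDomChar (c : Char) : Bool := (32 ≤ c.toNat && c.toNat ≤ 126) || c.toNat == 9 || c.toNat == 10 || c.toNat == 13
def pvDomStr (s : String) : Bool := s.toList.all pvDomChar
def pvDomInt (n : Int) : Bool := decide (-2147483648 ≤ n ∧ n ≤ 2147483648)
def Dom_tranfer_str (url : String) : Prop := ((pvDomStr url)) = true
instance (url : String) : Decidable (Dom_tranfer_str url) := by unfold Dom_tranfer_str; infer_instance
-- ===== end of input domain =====

-- B replaces A's five sequential full-string replace passes by one table-driven scan; same return value, "alternative" objective.


-- ===== PORT A =====
def tranfer_str (url : String) : String :=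
  let origin : List String := ["%3A", "%2F", "%3F", "%3D", "%26"]
  let tranfer : List String := [":", "/", "?", "=", "&"]
  (PySem.List.enumerate origin).foldl
    (fun data_url p => PySem.Str.replace data_url p.2 (PySem.List.pyGetD tranfer p.1 "")) url

-- ===== PORT B =====
-- the dict {'%3A': ':', '%2F': '/', '%3F': '?', '%3D': '=', '%26': '&'} (keys/values as char lists)
def tsTable : PySem.Dict (List Char) (List Char) :=
  ((((PySem.Dict.empty.insert ['%','3','A'] [':']).insert ['%','2','F'] ['/']).insert
      ['%','3','F'] ['?']).insert ['%','3','D'] ['=']).insert ['%','2','6'] ['&']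

-- the while loop of Source B: one pass; on '%', look up url[i:i+3] in the table
def tsScan : List Char → List Char
  | [] => []
  | c :: t =>
    if c = '%' then
      match tsTable.get? (List.take 3 (c :: t)) with
      | some rep => rep ++ tsScan (t.drop 2)
      | none => c :: tsScan t
    else c :: tsScan t
termination_by cs => cs.length
decreasing_by all_goals (simp [List.length_drop]; try omega)

def tranfer_str_alt (url : String) : String := String.ofList (tsScan url.toList)

-- ===== PRECONDITION & SPEC =====
def Spec_tranfer_str (url : String) (out : String) : Prop := out = tranfer_str_alt url
instance (url : String) (out : String) : Decidable (Spec_tranfer_str url out) := by unfold Spec_tranfer_str; infer_instance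

-- ===== CLAIM (what is proved, stated in full; the proofs are below) =====
def Claim_equal_tranfer_str : Prop := ∀ (url : String), Dom_tranfer_str url → Spec_tranfer_str url (tranfer_str url)

-- ===== LEMMAS AND PROOFS =====

-- single replace of the 3-char pattern ['%',a,b] by [v], as a clean recursion
def rep3 (a b v : Char) : List Char → List Char
  | [] => []
  | c :: t =>
    if List.isPrefixOf ['%', a, b] (c :: t) then v :: rep3 a b v (t.drop 2)
    else c :: rep3 a b v t
termination_by cs => cs.length
decreasing_by all_goals (simp [List.length_drop]; try omega)

theorem replace_go_eq (a b v : Char) : ∀ (fuel : Nat) (l acc : List Char), l.length ≤ fuel →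
    PySem.Chars.replace.go ['%', a, b] [v] fuel l acc = acc.reverse ++ rep3 a b v l := by
  intro fuel
  induction fuel with
  | zero =>
    intro l acc h
    have : l = [] := by cases l <;> simp_all
    subst this
    simp [PySem.Chars.replace.go, rep3]
  | succ n ih =>
    intro l acc h
    cases l with
    | nil => simp [PySem.Chars.replace.go, rep3]
    | cons c t =>
      rw [PySem.Chars.replace.go]
      by_cases hp : List.isPrefixOf ['%', a, b] (c :: t) = true
      · simp only [hp, if_pos]
        have hlen : (List.drop 2 t).length ≤ n := by
          simp at h ⊢; omega
        rw [show List.drop (['%',a,b] : List Char).length (c :: t) = List.drop 2 t by simp]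
        rw [ih _ _ hlen]
        rw [rep3, if_pos hp]
        simp
      · have hlen : t.length ≤ n := by simp at h; omega
        rw [if_neg hp, ih _ _ hlen, rep3]
        rw [if_neg hp]
        simp

theorem replace_eq_rep3 (a b v : Char) (l : List Char) :
    PySem.Chars.replace l ['%', a, b] [v] = rep3 a b v l := by
  rw [PySem.Chars.replace]
  simp
  exact replace_go_eq a b v l.length l [] le_rfl

-- pass-through: a non-'%' head is copied
theorem rep3_cons_ne (a b v c : Char) (l : List Char) (h : c ≠ '%') :
    rep3 a b v (c :: l) = c :: rep3 a b v l := by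
  rw [rep3]
  rw [if_neg]
  simp [List.isPrefixOf]
  intro h'
  exact absurd h'.symm h

-- '%' head with failing prefix test is copied
theorem rep3_percent_nomatch (a b v : Char) (l : List Char)
    (h : List.isPrefixOf ['%', a, b] ('%' :: l) ≠ true) :
    rep3 a b v ('%' :: l) = '%' :: rep3 a b v l := by
  rw [rep3, if_neg h]

-- match: the pattern is replaced
theorem rep3_match (a b v : Char) (l : List Char) :
    rep3 a b v ('%' :: a :: b :: l) = v :: rep3 a b v l := by
  rw [rep3, if_pos (by simp [List.isPrefixOf])]
  simp

-- a different key passes through unchanged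
theorem rep3_key_ne (a b v a' b' : Char) (l : List Char)
    (h : ¬(a' = a ∧ b' = b)) (ha : a' ≠ '%') (hb : b' ≠ '%') :
    rep3 a b v ('%' :: a' :: b' :: l) = '%' :: a' :: b' :: rep3 a b v l := by
  rw [rep3, if_neg]
  · rw [rep3_cons_ne _ _ _ _ _ ha, rep3_cons_ne _ _ _ _ _ hb]
  · simp [List.isPrefixOf]
    intro h1 h2
    exact h ⟨h1.symm, h2.symm⟩

-- rep3 with a value that is not a / not b never creates a new ['%',a,b] occurrence at a '%' boundary
theorem rep3_no_create (a b a' b' v' : Char) (l : List Char)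
    (hva : v' ≠ a) (hvb : v' ≠ b)
    (h : List.isPrefixOf ['%', a, b] ('%' :: rep3 a' b' v' l) = true) :
    List.isPrefixOf ['%', a, b] ('%' :: l) = true := by
  cases l with
  | nil => simp [rep3, List.isPrefixOf] at h
  | cons c t =>
    rw [rep3] at h
    split_ifs at h with hp
    · simp [List.isPrefixOf] at h
      exact absurd h.1.symm hva
    · simp [List.isPrefixOf] at h ⊢
      obtain ⟨hc, hrest⟩ := h
      refine ⟨hc, ?_⟩
      cases t with
      | nil => simp [rep3] at hrest
      | cons d u =>
        rw [rep3] at hrest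
        split_ifs at hrest with hq
        · simp at hrest
          exact absurd hrest.symm hvb
        · simp at hrest ⊢
          exact hrest

-- the composite of A's five replaces
def repC (s : List Char) : List Char :=
  rep3 '2' '6' '&' (rep3 '3' 'D' '=' (rep3 '3' 'F' '?' (rep3 '2' 'F' '/' (rep3 '3' 'A' ':' s))))

theorem no_create' (a b a' b' v' : Char) (l : List Char)
    (hva : v' ≠ a) (hvb : v' ≠ b)
    (h : List.isPrefixOf ['%', a, b] ('%' :: l) ≠ true) :
    List.isPrefixOf ['%', a, b] ('%' :: rep3 a' b' v' l) ≠ true :=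
  fun hx => h (rep3_no_create a b a' b' v' l hva hvb hx)

theorem get?_nil : tsTable.get? ['%'] = none := by decide

theorem get?_one (d : Char) : tsTable.get? ['%', d] = none := by
  simp [tsTable, PySem.Dict.get?, PySem.Dict.insert, PySem.Dict.empty, List.find?]

theorem get?_two_none (d e : Char) (h1 : ¬(d = '3' ∧ e = 'A')) (h2 : ¬(d = '2' ∧ e = 'F'))
    (h3 : ¬(d = '3' ∧ e = 'F')) (h4 : ¬(d = '3' ∧ e = 'D')) (h5 : ¬(d = '2' ∧ e = '6')) :
    tsTable.get? ['%', d, e] = none := by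
  have e1 : ('3' == d && 'A' == e) = false := by
    by_contra hx; simp at hx; exact h1 ⟨hx.1.symm, hx.2.symm⟩
  have e2 : ('2' == d && 'F' == e) = false := by
    by_contra hx; simp at hx; exact h2 ⟨hx.1.symm, hx.2.symm⟩
  have e3 : ('3' == d && 'F' == e) = false := by
    by_contra hx; simp at hx; exact h3 ⟨hx.1.symm, hx.2.symm⟩
  have e4 : ('3' == d && 'D' == e) = false := by
    by_contra hx; simp at hx; exact h4 ⟨hx.1.symm, hx.2.symm⟩
  have e5 : ('2' == d && '6' == e) = false := by
    by_contra hx; simp at hx; exact h5 ⟨hx.1.symm, hx.2.symm⟩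
  simp [tsTable, PySem.Dict.get?, PySem.Dict.insert, PySem.Dict.empty, List.find?, e1, e2, e3, e4, e5]

theorem rep3_singleton (a b v x : Char) : rep3 a b v [x] = [x] := by
  rw [rep3, if_neg (by simp [List.isPrefixOf])]
  rw [rep3]

theorem tsScan_singleton (x : Char) : tsScan [x] = [x] := by
  rw [tsScan]
  split_ifs with h
  · subst h; simp [get?_nil, tsScan]
  · rw [tsScan]

theorem repC_eq_tsScan : ∀ (n : Nat) (s : List Char), s.length ≤ n → repC s = tsScan s := by
  intro n
  induction n with
  | zero =>
    intro s h
    have hs : s = [] := by cases s <;> simp_all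
    subst hs
    simp [repC, rep3, tsScan]
  | succ n ih =>
    intro s h
    cases s with
    | nil => simp [repC, rep3, tsScan]
    | cons c t =>
      by_cases hc : c = '%'
      · subst hc
        cases t with
        | nil =>
          have hr : ∀ a b v : Char, rep3 a b v ['%'] = ['%'] := fun a b v => by
            rw [rep3, if_neg (by simp [List.isPrefixOf]), rep3]
          rw [tsScan]
          simp [repC, hr, get?_nil, tsScan]
        | cons d t2 =>
          cases t2 with
          | nil =>
            have hr : ∀ a b v : Char, rep3 a b v ['%', d] = ['%', d] := fun a b v => by
              rw [rep3_percent_nomatch _ _ _ _ (by simp [List.isPrefixOf]), rep3_singleton]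
            rw [tsScan]
            simp only [List.take, get?_one]
            simp [repC, hr, tsScan_singleton]
          | cons e u =>
            have hlen : u.length ≤ n := by simp at h; omega
            have hlen1 : (d :: e :: u).length ≤ n := by simp at h ⊢; omega
            by_cases h1 : d = '3' ∧ e = 'A'
            · obtain ⟨rfl, rfl⟩ := h1
              rw [show repC ('%' :: '3' :: 'A' :: u) =
                    ':' :: repC u from by
                simp only [repC]
                rw [rep3_match, rep3_cons_ne _ _ _ _ _ (by decide),
                    rep3_cons_ne _ _ _ _ _ (by decide), rep3_cons_ne _ _ _ _ _ (by decide),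
                    rep3_cons_ne _ _ _ _ _ (by decide)]]
              rw [tsScan]
              simp only [List.take, List.drop]
              rw [show tsTable.get? ['%', '3', 'A'] = some [':'] from by decide]
              simp [ih u hlen]
            · by_cases h2 : d = '2' ∧ e = 'F'
              · obtain ⟨rfl, rfl⟩ := h2
                rw [show repC ('%' :: '2' :: 'F' :: u) = '/' :: repC u from by
                  simp only [repC]
                  rw [rep3_key_ne _ _ _ _ _ _ (by decide) (by decide) (by decide),
                      rep3_match, rep3_cons_ne _ _ _ _ _ (by decide),
                      rep3_cons_ne _ _ _ _ _ (by decide), rep3_cons_ne _ _ _ _ _ (by decide)]]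
                rw [tsScan]
                simp only [List.take, List.drop]
                rw [show tsTable.get? ['%', '2', 'F'] = some ['/'] from by decide]
                simp [ih u hlen]
              · by_cases h3 : d = '3' ∧ e = 'F'
                · obtain ⟨rfl, rfl⟩ := h3
                  rw [show repC ('%' :: '3' :: 'F' :: u) = '?' :: repC u from by
                    simp only [repC]
                    rw [rep3_key_ne _ _ _ _ _ _ (by decide) (by decide) (by decide),
                        rep3_key_ne _ _ _ _ _ _ (by decide) (by decide) (by decide),
                        rep3_match, rep3_cons_ne _ _ _ _ _ (by decide),
                        rep3_cons_ne _ _ _ _ _ (by decide)]]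
                  rw [tsScan]
                  simp only [List.take, List.drop]
                  rw [show tsTable.get? ['%', '3', 'F'] = some ['?'] from by decide]
                  simp [ih u hlen]
                · by_cases h4 : d = '3' ∧ e = 'D'
                  · obtain ⟨rfl, rfl⟩ := h4
                    rw [show repC ('%' :: '3' :: 'D' :: u) = '=' :: repC u from by
                      simp only [repC]
                      rw [rep3_key_ne _ _ _ _ _ _ (by decide) (by decide) (by decide),
                          rep3_key_ne _ _ _ _ _ _ (by decide) (by decide) (by decide),
                          rep3_key_ne _ _ _ _ _ _ (by decide) (by decide) (by decide),
                          rep3_match, rep3_cons_ne _ _ _ _ _ (by decide)]]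
                    rw [tsScan]
                    simp only [List.take, List.drop]
                    rw [show tsTable.get? ['%', '3', 'D'] = some ['='] from by decide]
                    simp [ih u hlen]
                  · by_cases h5 : d = '2' ∧ e = '6'
                    · obtain ⟨rfl, rfl⟩ := h5
                      rw [show repC ('%' :: '2' :: '6' :: u) = '&' :: repC u from by
                        simp only [repC]
                        rw [rep3_key_ne _ _ _ _ _ _ (by decide) (by decide) (by decide),
                            rep3_key_ne _ _ _ _ _ _ (by decide) (by decide) (by decide),
                            rep3_key_ne _ _ _ _ _ _ (by decide) (by decide) (by decide),
                            rep3_key_ne _ _ _ _ _ _ (by decide) (by decide) (by decide),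
                            rep3_match]]
                      rw [tsScan]
                      simp only [List.take, List.drop]
                      rw [show tsTable.get? ['%', '2', '6'] = some ['&'] from by decide]
                      simp [ih u hlen]
                    · -- no key matches: '%' is copied by every layer and by the scan
                      have p1 : List.isPrefixOf ['%', '3', 'A'] ('%' :: d :: e :: u) ≠ true := by
                        simp [List.isPrefixOf]; intro hd he; exact h1 ⟨hd.symm, he.symm⟩
                      have p2 : List.isPrefixOf ['%', '2', 'F'] ('%' :: d :: e :: u) ≠ true := by
                        simp [List.isPrefixOf]; intro hd he; exact h2 ⟨hd.symm, he.symm⟩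
                      have p3 : List.isPrefixOf ['%', '3', 'F'] ('%' :: d :: e :: u) ≠ true := by
                        simp [List.isPrefixOf]; intro hd he; exact h3 ⟨hd.symm, he.symm⟩
                      have p4 : List.isPrefixOf ['%', '3', 'D'] ('%' :: d :: e :: u) ≠ true := by
                        simp [List.isPrefixOf]; intro hd he; exact h4 ⟨hd.symm, he.symm⟩
                      have p5 : List.isPrefixOf ['%', '2', '6'] ('%' :: d :: e :: u) ≠ true := by
                        simp [List.isPrefixOf]; intro hd he; exact h5 ⟨hd.symm, he.symm⟩
                      -- push ≠-prefix facts through the earlier layers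
                      have q2 := no_create' '2' 'F' '3' 'A' ':' (d :: e :: u) (by decide) (by decide) p2
                      have q3 := no_create' '3' 'F' '2' 'F' '/' _ (by decide) (by decide)
                        (no_create' '3' 'F' '3' 'A' ':' (d :: e :: u) (by decide) (by decide) p3)
                      have q4 := no_create' '3' 'D' '3' 'F' '?' _ (by decide) (by decide)
                        (no_create' '3' 'D' '2' 'F' '/' _ (by decide) (by decide)
                          (no_create' '3' 'D' '3' 'A' ':' (d :: e :: u) (by decide) (by decide) p4))
                      have q5 := no_create' '2' '6' '3' 'D' '=' _ (by decide) (by decide)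
                        (no_create' '2' '6' '3' 'F' '?' _ (by decide) (by decide)
                          (no_create' '2' '6' '2' 'F' '/' _ (by decide) (by decide)
                            (no_create' '2' '6' '3' 'A' ':' (d :: e :: u) (by decide) (by decide) p5)))
                      rw [show repC ('%' :: d :: e :: u) = '%' :: repC (d :: e :: u) from by
                        simp only [repC]
                        rw [rep3_percent_nomatch _ _ _ _ p1, rep3_percent_nomatch _ _ _ _ q2,
                            rep3_percent_nomatch _ _ _ _ q3, rep3_percent_nomatch _ _ _ _ q4,
                            rep3_percent_nomatch _ _ _ _ q5]]
                      rw [tsScan]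
                      simp only [List.take]
                      rw [get?_two_none d e h1 h2 h3 h4 h5]
                      simp [ih _ hlen1]
      · have hlen : t.length ≤ n := by simp at h; omega
        rw [show repC (c :: t) = c :: repC t from by
          simp only [repC]
          rw [rep3_cons_ne _ _ _ _ _ hc, rep3_cons_ne _ _ _ _ _ hc,
              rep3_cons_ne _ _ _ _ _ hc, rep3_cons_ne _ _ _ _ _ hc,
              rep3_cons_ne _ _ _ _ _ hc]]
        rw [tsScan, if_neg hc]
        simp [ih t hlen]

theorem tranfer_str_toList (url : String) :
    (tranfer_str url).toList = repC url.toList := by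
  simp only [tranfer_str, PySem.List.enumerate_cons, PySem.List.enumerate_nil, List.foldl,
    PySem.Str.replace, repC]
  norm_num [PySem.List.pyGetD]
  simp [replace_eq_rep3,
    show ("%3A" : String).toList = ['%','3','A'] from rfl,
    show ("%2F" : String).toList = ['%','2','F'] from rfl,
    show ("%3F" : String).toList = ['%','3','F'] from rfl,
    show ("%3D" : String).toList = ['%','3','D'] from rfl,
    show ("%26" : String).toList = ['%','2','6'] from rfl,
    show (":" : String).toList = [':'] from rfl,
    show ("/" : String).toList = ['/'] from rfl,
    show ("?" : String).toList = ['?'] from rfl,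
    show ("=" : String).toList = ['='] from rfl,
    show ("&" : String).toList = ['&'] from rfl]

theorem tranfer_str_spec : Claim_equal_tranfer_str := by
  unfold Claim_equal_tranfer_str
  intro url _
  unfold Spec_tranfer_str
  have h1 : (tranfer_str url).toList = (tranfer_str_alt url).toList := by
    rw [tranfer_str_toList, tranfer_str_alt, String.toList_ofList]
    exact repC_eq_tsScan url.toList.length url.toList le_rfl
  calc tranfer_str url = String.ofList (tranfer_str url).toList := by
        rw [String.ofList_toList]
    _ = String.ofList (tranfer_str_alt url).toList := by rw [h1]
    _ = tranfer_str_alt url := by rw [String.ofList_toList]
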